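-- pv_equiv track=rewrite | github.com/seonggim743/yu-notice-bot | services/notification/formatters.py | _context_change_groups
-- ===== SOURCE A (Python) =====
-- CONTEXT_DIFF_GROUP_EQUAL_LIMIT = 6
--
-- def _context_change_groups(
--     opcodes: list[tuple[str, int, int, int, int]]
-- ) -> list[tuple[int, int, int, int]]:
--     groups = []
--     current = None
--     for tag, old_start, old_end, new_start, new_end in opcodes:
--         if tag == "equal":
--             if (
--                 current is not None
--                 and old_end - old_start <= CONTEXT_DIFF_GROUP_EQUAL_LIMIT
--                 and new_end - new_start <= CONTEXT_DIFF_GROUP_EQUAL_LIMIT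
--             ):
--                 current[1] = old_end
--                 current[3] = new_end
--             else:
--                 if current is not None:
--                     groups.append(tuple(current))
--                     current = None
--             continue
--
--         if current is None:
--             current = [old_start, old_end, new_start, new_end]
--         else:
--             current[1] = old_end
--             current[3] = new_end
--
--     if current is not None:
--         groups.append(tuple(current))
--     return groups
-- ===== SOURCE B (Python) =====
-- CONTEXT_DIFF_GROUP_EQUAL_LIMIT = 6
--
--
-- def _is_separator(op):
--     tag, old_start, old_end, new_start, new_end = op
--     return tag == "equal" and (
--         old_end - old_start > CONTEXT_DIFF_GROUP_EQUAL_LIMIT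
--         or new_end - new_start > CONTEXT_DIFF_GROUP_EQUAL_LIMIT
--     )
--
--
-- def _context_change_groups(
--     opcodes: list[tuple[str, int, int, int, int]]
-- ) -> list[tuple[int, int, int, int]]:
--     # Pass 1: split the opcode list into segments at the 'large equal' separators
--     # (an equal block whose old or new side exceeds the context limit).
--     segments = []
--     seg = []
--     for op in opcodes:
--         if _is_separator(op):
--             segments.append(seg)
--             seg = []
--         else:
--             seg.append(op)
--     segments.append(seg)
--     # Pass 2: a segment yields a group iff it contains a change; the group spans
--     # from the first change's start coordinates to the segment's end coordinates.
--     out = []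
--     for seg in segments:
--         changes = seg
--         while changes and changes[0][0] == "equal":
--             changes = changes[1:]
--         if changes:
--             out.append((changes[0][1], seg[-1][2], changes[0][3], seg[-1][4]))
--     return out
-- ===== Notes on version B (the rewrite author's own statement) =====
-- stated objective: alternative
-- what changed: B replaces A's single stateful pass with a running current-group accumulator by a split-then-scan algorithm: pass 1 splits the opcode list into segments at 'large equal' separators, pass 2 turns each segment containing a change into its bounding tuple (first change's starts, segment's last ends), with change-free segments dropped.
import Mathlib
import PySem

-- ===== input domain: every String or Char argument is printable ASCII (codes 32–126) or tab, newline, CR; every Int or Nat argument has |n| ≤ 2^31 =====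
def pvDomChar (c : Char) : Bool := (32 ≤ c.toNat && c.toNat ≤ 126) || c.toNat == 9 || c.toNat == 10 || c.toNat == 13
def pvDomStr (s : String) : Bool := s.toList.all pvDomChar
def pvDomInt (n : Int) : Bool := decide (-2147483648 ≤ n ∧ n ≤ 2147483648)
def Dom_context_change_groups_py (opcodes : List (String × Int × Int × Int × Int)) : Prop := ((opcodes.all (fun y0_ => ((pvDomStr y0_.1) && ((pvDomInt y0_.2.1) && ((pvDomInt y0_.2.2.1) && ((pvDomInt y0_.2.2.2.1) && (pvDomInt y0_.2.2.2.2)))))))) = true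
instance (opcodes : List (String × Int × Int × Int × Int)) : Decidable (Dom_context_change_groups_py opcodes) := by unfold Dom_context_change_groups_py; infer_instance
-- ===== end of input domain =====

-- B replaces A's single stateful pass by a split-then-scan algorithm: split the opcodes at
-- 'large equal' separators, then map each segment with a change to its bounding tuple
-- (objective: alternative algorithm, same cost).

-- ===== PORT A =====
-- A's running state: the groups emitted so far and the mutable 4-element `current` (or none).
def pvAStep (st : List (Int × Int × Int × Int) × Option (Int × Int × Int × Int))
    (op : String × Int × Int × Int × Int) :
    List (Int × Int × Int × Int) × Option (Int × Int × Int × Int) :=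
  let (groups, current) := st
  let (tag, old_start, old_end, new_start, new_end) := op
  if tag == "equal" then
    match current with
    | some (c0, c1, c2, c3) =>
        if old_end - old_start ≤ 6 ∧ new_end - new_start ≤ 6 then
          (groups, some (c0, old_end, c2, new_end))
        else
          (groups ++ [(c0, c1, c2, c3)], none)
    | none => (groups, none)
  else
    match current with
    | none => (groups, some (old_start, old_end, new_start, new_end))
    | some (c0, _, c2, _) => (groups, some (c0, old_end, c2, new_end))

def context_change_groups_py (opcodes : List (String × Int × Int × Int × Int)) : List (Int × Int × Int × Int) :=
  let st := opcodes.foldl pvAStep ([], none)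
  match st.2 with
  | some c => st.1 ++ [c]
  | none => st.1

-- ===== PORT B =====
-- a 'large equal' opcode: an equal block exceeding the context limit on either side.
def pvIsSep (op : String × Int × Int × Int × Int) : Bool :=
  op.1 == "equal" && (decide (6 < op.2.2.1 - op.2.1) || decide (6 < op.2.2.2.2 - op.2.2.2.1))

-- pass 1 of B: split at separators; state = (closed segments, current segment).
def pvSplitStep (st : List (List (String × Int × Int × Int × Int)) × List (String × Int × Int × Int × Int))
    (op : String × Int × Int × Int × Int) :
    List (List (String × Int × Int × Int × Int)) × List (String × Int × Int × Int × Int) :=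
  if pvIsSep op then (st.1 ++ [st.2], []) else (st.1, st.2 ++ [op])

-- pass 2 of B: a segment's group, if any — drop leading equals, then bound by the
-- first change's start coordinates and the segment's last end coordinates.
def pvSegBox (seg : List (String × Int × Int × Int × Int)) : Option (Int × Int × Int × Int) :=
  match seg.dropWhile (fun op => op.1 == "equal") with
  | [] => none
  | x :: _ => some (x.2.1, (seg.getLastD x).2.2.1, x.2.2.2.1, (seg.getLastD x).2.2.2.2)

def context_change_groups_py_alt (opcodes : List (String × Int × Int × Int × Int)) : List (Int × Int × Int × Int) :=
  let st := opcodes.foldl pvSplitStep ([], [])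
  (st.1 ++ [st.2]).filterMap pvSegBox

-- ===== PRECONDITION & SPEC =====
def Spec_context_change_groups_py (opcodes : List (String × Int × Int × Int × Int)) (out : List (Int × Int × Int × Int)) : Prop := out = context_change_groups_py_alt opcodes
instance (opcodes : List (String × Int × Int × Int × Int)) (out : List (Int × Int × Int × Int)) : Decidable (Spec_context_change_groups_py opcodes out) := by unfold Spec_context_change_groups_py; infer_instance

-- ===== CLAIM (what is proved, stated in full; the proofs are below) =====
def Claim_equal_context_change_groups_py : Prop := ∀ (opcodes : List (String × Int × Int × Int × Int)), Dom_context_change_groups_py opcodes → Spec_context_change_groups_py opcodes (context_change_groups_py opcodes)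

-- ===== LEMMAS AND PROOFS =====

-- appending an op whose box is unchanged shape: pvSegBox of seg ++ [op]
theorem pvSegBox_append (seg : List (String × Int × Int × Int × Int))
    (op : String × Int × Int × Int × Int) :
    pvSegBox (seg ++ [op]) =
      (match seg.dropWhile (fun o => o.1 == "equal") with
       | [] => if op.1 == "equal" then none
               else some (op.2.1, op.2.2.1, op.2.2.2.1, op.2.2.2.2)
       | x :: _ => some (x.2.1, op.2.2.1, x.2.2.2.1, op.2.2.2.2)) := by
  unfold pvSegBox
  rw [List.dropWhile_append]
  cases hd : seg.dropWhile (fun o => o.1 == "equal") with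
  | nil =>
      simp only [List.isEmpty_nil, if_true, List.dropWhile]
      by_cases ht : op.1 == "equal"
      · simp [ht]
      · simp [ht]
  | cons x r =>
      simp only [List.isEmpty_cons, List.cons_append]
      simp

-- A's current equals the box of B's current segment; induction carries both folds together.
theorem pvKey (opcodes : List (String × Int × Int × Int × Int))
    (segs : List (List (String × Int × Int × Int × Int)))
    (cur : List (String × Int × Int × Int × Int)) :
    (match (opcodes.foldl pvAStep (segs.filterMap pvSegBox, pvSegBox cur)).2 with
      | some c => (opcodes.foldl pvAStep (segs.filterMap pvSegBox, pvSegBox cur)).1 ++ [c]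
      | none => (opcodes.foldl pvAStep (segs.filterMap pvSegBox, pvSegBox cur)).1) =
    ((opcodes.foldl pvSplitStep (segs, cur)).1 ++ [(opcodes.foldl pvSplitStep (segs, cur)).2]).filterMap pvSegBox := by
  induction opcodes generalizing segs cur with
  | nil =>
      simp only [List.foldl_nil, List.filterMap_append]
      cases hb : pvSegBox cur <;> simp [List.filterMap, hb]
  | cons op ops ih =>
      obtain ⟨tag, os, oe, ns, ne⟩ := op
      simp only [List.foldl_cons]
      by_cases ht : tag = "equal"
      · subst ht
        by_cases hs : oe - os ≤ 6 ∧ ne - ns ≤ 6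
        · -- small equal: not a separator; appended to the current segment
          have hsep : pvIsSep ("equal", os, oe, ns, ne) = false := by
            simp only [pvIsSep]; simp; omega
          have hbox : pvSegBox (cur ++ [("equal", os, oe, ns, ne)]) =
              (match pvSegBox cur with
               | none => none
               | some (c0, _, c2, _) => some (c0, oe, c2, ne)) := by
            rw [pvSegBox_append]
            unfold pvSegBox
            cases cur.dropWhile (fun o => o.1 == "equal") <;> simp
          have hA : pvAStep (segs.filterMap pvSegBox, pvSegBox cur) ("equal", os, oe, ns, ne)
              = (segs.filterMap pvSegBox, pvSegBox (cur ++ [("equal", os, oe, ns, ne)])) := by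
            rw [hbox]
            unfold pvAStep
            cases hb : pvSegBox cur with
            | none => simp
            | some c => obtain ⟨c0, c1, c2, c3⟩ := c; simp [hs]
          rw [hA, pvSplitStep, hsep]
          simpa using ih segs (cur ++ [("equal", os, oe, ns, ne)])
        · -- large equal: a separator; closes the current segment
          have hsep : pvIsSep ("equal", os, oe, ns, ne) = true := by
            simp only [pvIsSep]; simp; omega
          have hnil : pvSegBox ([] : List (String × Int × Int × Int × Int)) = none := rfl
          have hA : pvAStep (segs.filterMap pvSegBox, pvSegBox cur) ("equal", os, oe, ns, ne)
              = ((segs ++ [cur]).filterMap pvSegBox, pvSegBox ([] : List (String × Int × Int × Int × Int))) := by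
            rw [hnil]
            unfold pvAStep
            cases hb : pvSegBox cur with
            | none =>
                simp only [List.filterMap_append, List.filterMap_cons, List.filterMap_nil, hb]
                simp
            | some c =>
                obtain ⟨c0, c1, c2, c3⟩ := c
                simp only [List.filterMap_append, List.filterMap_cons, List.filterMap_nil, hb]
                simp only [beq_self_eq_true, if_true]
                rw [if_neg hs]
          rw [hA, pvSplitStep, hsep]
          simpa using ih (segs ++ [cur]) []
      · -- a change: not a separator; opens or extends the current segment
        have hts : (tag == "equal") = false := by simp [ht]
        have hsep : pvIsSep (tag, os, oe, ns, ne) = false := by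
          simp only [pvIsSep]; simp [ht]
        have hbox : pvSegBox (cur ++ [(tag, os, oe, ns, ne)]) =
            (match pvSegBox cur with
             | none => some (os, oe, ns, ne)
             | some (c0, _, c2, _) => some (c0, oe, c2, ne)) := by
          rw [pvSegBox_append]
          unfold pvSegBox
          cases cur.dropWhile (fun o => o.1 == "equal") <;> simp [hts]
        have hA : pvAStep (segs.filterMap pvSegBox, pvSegBox cur) (tag, os, oe, ns, ne)
            = (segs.filterMap pvSegBox, pvSegBox (cur ++ [(tag, os, oe, ns, ne)])) := by
          rw [hbox]
          unfold pvAStep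
          cases hb : pvSegBox cur with
          | none => simp [hts]
          | some c => obtain ⟨c0, c1, c2, c3⟩ := c; simp [hts]
        rw [hA, pvSplitStep, hsep]
        simpa using ih segs (cur ++ [(tag, os, oe, ns, ne)])

-- ===== VERDICT (by name: the statement is the Claim_ definition above) =====
theorem context_change_groups_py_spec : Claim_equal_context_change_groups_py := by
  intro opcodes _
  unfold Spec_context_change_groups_py context_change_groups_py context_change_groups_py_alt
  have h := pvKey opcodes [] []
  simpa [pvSegBox, List.filterMap] using h
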